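-- pv_equiv track=rewrite | github.com/felipemarianoferr/Brex-Challenge-Back | agent/data_loader.py | get_vendor_spending
-- ===== SOURCE A (Python) =====
-- from typing import List, Dict, Any
--
-- def get_vendor_spending(transactions: List[Dict[str, Any]]) -> Dict[str, List[Dict[str, Any]]]:
--     """Group transactions by vendor"""
--     vendor_dict = {}
--     for transaction in transactions:
--         vendor = transaction.get('vendor_name', 'Unknown')
--         if vendor not in vendor_dict:
--             vendor_dict[vendor] = []
--         vendor_dict[vendor].append(transaction)
--     return vendor_dict
-- ===== SOURCE B (Python) =====
-- def get_vendor_spending(transactions):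
--     """Group transactions by vendor: one pass collecting distinct vendors in
--     first-appearance order, then one filtering scan per vendor."""
--     vendors = list(dict.fromkeys(t.get('vendor_name', 'Unknown') for t in transactions))
--     return {v: [t for t in transactions if t.get('vendor_name', 'Unknown') == v]
--             for v in vendors}
-- ===== Notes on version B (the rewrite author's own statement) =====
-- stated objective: alternative
-- what changed: Replaces the single append-into-dict loop by a two-phase group-by: one pass collects the distinct vendor names in first-appearance order, then a dict comprehension filters the transaction list once per vendor.
import Mathlib
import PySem

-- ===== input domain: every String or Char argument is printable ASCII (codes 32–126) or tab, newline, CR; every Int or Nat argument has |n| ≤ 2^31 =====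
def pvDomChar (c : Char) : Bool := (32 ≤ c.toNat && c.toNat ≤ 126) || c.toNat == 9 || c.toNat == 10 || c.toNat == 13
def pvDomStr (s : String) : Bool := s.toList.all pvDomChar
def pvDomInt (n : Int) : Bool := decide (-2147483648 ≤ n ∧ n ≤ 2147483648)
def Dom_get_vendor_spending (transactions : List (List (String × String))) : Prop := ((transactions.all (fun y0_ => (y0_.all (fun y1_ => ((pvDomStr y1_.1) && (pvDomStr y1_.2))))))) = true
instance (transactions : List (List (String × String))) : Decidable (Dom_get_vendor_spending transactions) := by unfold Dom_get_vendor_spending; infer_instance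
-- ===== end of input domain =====

-- B groups by vendor via an ordered-distinct vendor pass plus one filter per vendor,
-- instead of A's single append-into-dict loop (objective: alternative decomposition).

-- transaction.get('vendor_name', 'Unknown') (first-match association-list lookup)
def pvKey (t : List (String × String)) : String :=
  (PySem.Dict.mk t).getD "vendor_name" "Unknown"

-- ===== PORT A =====
def get_vendor_spending (transactions : List (List (String × String))) : List (String × List (List (String × String))) :=
  (transactions.foldl
    (fun d t =>
      let vendor := pvKey t
      let d := if d.contains vendor then d
               else d.insert vendor ([] : List (List (String × String)))
      d.modify vendor [] (· ++ [t]))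
    PySem.Dict.empty).items

-- ===== PORT B =====
def get_vendor_spending_alt (transactions : List (List (String × String))) : List (String × List (List (String × String))) :=
  let vendors := PySem.Set.ofList (transactions.map pvKey)
  -- dict comprehension over distinct keys: items in key order
  vendors.map (fun v => (v, transactions.filter (fun t => pvKey t == v)))

-- ===== PRECONDITION & SPEC =====
def Spec_get_vendor_spending (transactions : List (List (String × String))) (out : List (String × List (List (String × String)))) : Prop := out = get_vendor_spending_alt transactions
instance (transactions : List (List (String × String))) (out : List (String × List (List (String × String)))) : Decidable (Spec_get_vendor_spending transactions out) := by unfold Spec_get_vendor_spending; infer_instance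

-- ===== CLAIM (what is proved, stated in full; the proofs are below) =====
def Claim_equal_get_vendor_spending : Prop := ∀ (transactions : List (List (String × String))), Dom_get_vendor_spending transactions → Spec_get_vendor_spending transactions (get_vendor_spending transactions)

-- ===== LEMMAS AND PROOFS =====

-- A's loop body (conditional insert of [] then append) is the standard modify with default [].
theorem stepA_eq (d : PySem.Dict String (List (List (String × String)))) (t : List (String × String)) :
    (let vendor := pvKey t
     let d := if d.contains vendor then d
              else d.insert vendor ([] : List (List (String × String)))
     d.modify vendor [] (· ++ [t]))
    = d.modify (pvKey t) [] (· ++ [t]) := by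
  by_cases h : d.contains (pvKey t)
  · simp [h]
  · simp only [h, Bool.false_eq_true, if_false]
    simp [PySem.Dict.modify, PySem.Dict.getD_insert_self, PySem.Dict.insert_insert_self]
    rw [PySem.Dict.getD_of_not_contains d [] (by simpa using h)]
    simp

theorem get_vendor_spending_spec' (transactions : List (List (String × String))) :
    get_vendor_spending transactions = get_vendor_spending_alt transactions := by
  unfold get_vendor_spending get_vendor_spending_alt
  have hstep : (fun (d : PySem.Dict String (List (List (String × String)))) t =>
      let vendor := pvKey t
      let d := if d.contains vendor then d
               else d.insert vendor ([] : List (List (String × String)))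
      d.modify vendor [] (· ++ [t]))
      = fun d t => d.modify (pvKey t) [] (· ++ [t]) := by
    funext d t; exact stepA_eq d t
  rw [hstep]
  set D := transactions.foldl (fun d t => d.modify (pvKey t) [] (· ++ [t])) PySem.Dict.empty with hD
  have hnd : D.keys.Nodup := by
    exact PySem.Dict.nodup_keys_foldl_modify_key transactions pvKey [] (fun d t => (· ++ [t]))
      PySem.Dict.empty PySem.Dict.nodup_keys_empty
  have hkeys : D.keys = PySem.Set.ofList (transactions.map pvKey) := by
    rw [hD, PySem.Dict.keys_foldl_modify_key, PySem.Dict.keys_empty, PySem.Set.update_nil_left]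
  have hgetD : ∀ v, D.getD v [] = transactions.filter (fun t => pvKey t == v) := by
    intro v
    have : D = (transactions.map (fun t => (pvKey t, t))).foldl
        (fun d p => d.modify p.1 [] (· ++ [p.2])) PySem.Dict.empty := by
      rw [hD, List.foldl_map]
    rw [this, PySem.Dict.getD_foldl_modify_append, PySem.Dict.getD_empty]
    simp [List.filter_map, Function.comp_def]
  rw [PySem.Dict.items_eq_map_keys D hnd [], hkeys]
  exact List.map_congr_left (fun v _ => by rw [hgetD v])

-- ===== VERDICT (by name: the statement is the Claim_ definition above) =====
theorem get_vendor_spending_spec : Claim_equal_get_vendor_spending := by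
  intro transactions _
  exact get_vendor_spending_spec' transactions
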